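-- pv_equiv track=rewrite | github.com/adamfilli/happy-simulator | happysimulator/components/replication/multi_leader.py | _vc_dominates
-- ===== SOURCE A (Python) =====
-- def _vc_dominates(a: dict[str, int], b: dict[str, int]) -> bool:
--     """Check if vector clock ``a`` causally dominates ``b``."""
--     all_keys = set(a) | set(b)
--     all_geq = True
--     any_gt = False
--     for k in all_keys:
--         val_a = a.get(k, 0)
--         val_b = b.get(k, 0)
--         if val_a < val_b:
--             all_geq = False
--             break
--         if val_a > val_b:
--             any_gt = True
--     return all_geq and any_gt
-- ===== SOURCE B (Python) =====
-- def _vc_dominates(a: dict[str, int], b: dict[str, int]) -> bool: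
--     """Check if vector clock ``a`` causally dominates ``b``."""
--     xs = sorted(a.items(), key=lambda kv: kv[0])
--     ys = sorted(b.items(), key=lambda kv: kv[0])
--     i, j = 0, 0
--     gt = False
--     while i < len(xs) and j < len(ys):
--         (ka, va), (kb, vb) = xs[i], ys[j]
--         if ka < kb:
--             vb = 0
--             i += 1
--         elif kb < ka:
--             va = 0
--             j += 1
--         else:
--             i += 1
--             j += 1
--         if va < vb:
--             return False
--         if va > vb:
--             gt = True
--     for _, va in xs[i:]:
--         if va < 0:
--             return False
--         if va > 0:
--             gt = True
--     for _, vb in ys[j:]: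
--         if vb > 0:
--             return False
--         if vb < 0:
--             gt = True
--     return gt
-- ===== Notes on version B (the rewrite author's own statement) =====
-- stated objective: alternative
-- what changed: B sorts both clocks' items by key and decides dominance with a two-pointer merge over the two sorted lists (plus tail sweeps), doing no key-union construction and no dict lookups, instead of A's single scan over set(a)|set(b) with .get lookups and two flags.
import Mathlib
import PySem

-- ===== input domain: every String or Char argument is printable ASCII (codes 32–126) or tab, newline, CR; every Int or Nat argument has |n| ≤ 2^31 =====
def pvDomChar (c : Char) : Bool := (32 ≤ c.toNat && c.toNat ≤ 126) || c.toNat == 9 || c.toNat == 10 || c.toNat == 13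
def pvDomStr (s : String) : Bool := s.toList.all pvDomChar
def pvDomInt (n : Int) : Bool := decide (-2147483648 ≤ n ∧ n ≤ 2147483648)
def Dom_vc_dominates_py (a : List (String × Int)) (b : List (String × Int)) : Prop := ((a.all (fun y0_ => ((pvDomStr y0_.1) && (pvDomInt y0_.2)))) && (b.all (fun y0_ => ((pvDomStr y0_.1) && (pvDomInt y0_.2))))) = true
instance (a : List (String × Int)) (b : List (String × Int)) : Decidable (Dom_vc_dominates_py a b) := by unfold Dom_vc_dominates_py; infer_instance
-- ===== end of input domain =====

-- B replaces A's scan over the key union set(a)|set(b) (two flags, .get lookups,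
-- early break) by sorting both clocks' items by key and running a two-pointer
-- merge of the two sorted lists; objective: alternative (same result, different
-- algorithm). A's set-iteration order does not affect its result, so A's port
-- iterates the canonical first-insertion union order.

-- ===== PORT A =====
-- for k in all_keys: … with the early 'break' modelled by returning immediately;
-- state = (all_geq, any_gt) carried through the recursion.
def vcLoopA (a b : PySem.Dict String Int) : List String → Bool → Bool → Bool
  | [], all_geq, any_gt => all_geq && any_gt
  | k :: ks, all_geq, any_gt =>
    let val_a := a.getD k 0
    let val_b := b.getD k 0
    if val_a < val_b then false && any_gt           -- all_geq = False; break
    else if val_a > val_b then vcLoopA a b ks all_geq true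
    else vcLoopA a b ks all_geq any_gt

def vc_dominates_py (a : List (String × Int)) (b : List (String × Int)) : Bool :=
  let da := PySem.Dict.ofList a
  let db := PySem.Dict.ofList b
  let all_keys := PySem.Set.union (PySem.Set.ofList da.keys) db.keys
  vcLoopA da db all_keys true false

-- ===== PORT B =====
-- the 'while i < len(xs) and j < len(ys)' merge loop fused with the two tail
-- 'for' sweeps: the cons/cons case is the while body, cons/nil the sweeps.
def vcMergeLoop : List (String × Int) → List (String × Int) → Bool → Bool
  | [], [], gt => gt
  | (_, va) :: xs, [], gt =>
      if va < 0 then false else vcMergeLoop xs [] (gt || va > 0)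
  | [], (_, vb) :: ys, gt =>
      if 0 < vb then false else vcMergeLoop [] ys (gt || vb < 0)
  | (ka, va) :: xs, (kb, vb) :: ys, gt =>
      if ka < kb then
        (if va < 0 then false else vcMergeLoop xs ((kb, vb) :: ys) (gt || va > 0))
      else if kb < ka then
        (if 0 < vb then false else vcMergeLoop ((ka, va) :: xs) ys (gt || vb < 0))
      else
        (if va < vb then false else vcMergeLoop xs ys (gt || va > vb))
termination_by xs ys _ => xs.length + ys.length

def vc_dominates_py_alt (a : List (String × Int)) (b : List (String × Int)) : Bool :=
  let xs := PySem.List.sorted (PySem.Dict.ofList a).items (fun kv => kv.1) false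
  let ys := PySem.List.sorted (PySem.Dict.ofList b).items (fun kv => kv.1) false
  vcMergeLoop xs ys false

-- ===== PRECONDITION & SPEC =====
def Spec_vc_dominates_py (a : List (String × Int)) (b : List (String × Int)) (out : Bool) : Prop := out = vc_dominates_py_alt a b
instance (a : List (String × Int)) (b : List (String × Int)) (out : Bool) : Decidable (Spec_vc_dominates_py a b out) := by unfold Spec_vc_dominates_py; infer_instance

-- ===== CLAIM (what is proved, stated in full; the proofs are below) =====
def Claim_equal_vc_dominates_py : Prop := ∀ (a : List (String × Int)) (b : List (String × Int)), Dom_vc_dominates_py a b → Spec_vc_dominates_py a b (vc_dominates_py a b)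

-- ===== LEMMAS AND PROOFS =====

/-- first-match lookup with default 0 (what both programs' per-key value is). -/
def vcLk (l : List (String × Int)) (k : String) : Int :=
  ((l.find? (fun p => decide (p.1 = k))).map Prod.snd).getD 0

theorem vcLk_nil (k : String) : vcLk [] k = 0 := rfl

theorem vcLk_cons_self (ka : String) (va : Int) (xs : List (String × Int)) :
    vcLk ((ka, va) :: xs) ka = va := by simp [vcLk]

theorem vcLk_cons_ne (ka k : String) (va : Int) (xs : List (String × Int)) (h : k ≠ ka) :
    vcLk ((ka, va) :: xs) k = vcLk xs k := by
  simp [vcLk, List.find?, Ne.symm h]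

theorem vcLk_of_not_mem (l : List (String × Int)) (k : String)
    (h : k ∉ l.map Prod.fst) : vcLk l k = 0 := by
  induction l with
  | nil => rfl
  | cons p l ih =>
    obtain ⟨ka, va⟩ := p
    simp only [List.map_cons, List.mem_cons, not_or] at h
    rw [vcLk_cons_ne _ _ _ _ h.1]; exact ih h.2

theorem vcLk_head_tail (ka : String) (va : Int) (xs : List (String × Int))
    (h : ((ka, va) :: xs).Pairwise (fun p q => p.1 < q.1)) : vcLk xs ka = 0 := by
  apply vcLk_of_not_mem
  intro hmem
  obtain ⟨p, hp, hk⟩ := List.mem_map.mp hmem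
  have := (List.pairwise_cons.mp h).1 p hp
  simp only at this
  rw [hk] at this; exact lt_irrefl _ this

theorem vcLk_lt_head (ka kb : String) (vb : Int) (ys : List (String × Int))
    (h : ((kb, vb) :: ys).Pairwise (fun p q => p.1 < q.1)) (hlt : ka < kb) :
    vcLk ((kb, vb) :: ys) ka = 0 := by
  rw [vcLk_cons_ne _ _ _ _ (ne_of_lt hlt)]
  apply vcLk_of_not_mem
  intro hmem
  obtain ⟨p, hp, hk⟩ := List.mem_map.mp hmem
  have := (List.pairwise_cons.mp h).1 p hp
  simp only at this
  rw [hk] at this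
  exact absurd (lt_trans hlt this) (lt_irrefl ka)

/-- splitting the ∀-side at a fresh head key. -/
theorem vc_forall_cons (ka : String) (va : Int) (xs : List (String × Int))
    (g : String → Int) (h0 : vcLk xs ka = 0) (hg : g ka = 0) :
    (∀ k, vcLk ((ka, va) :: xs) k ≥ g k) ↔ (va ≥ g ka ∧ ∀ k, vcLk xs k ≥ g k) := by
  constructor
  · intro h
    refine ⟨by have := h ka; rwa [vcLk_cons_self] at this, fun k => ?_⟩
    by_cases hk : k = ka
    · rw [hk, h0, hg]
    · have := h k; rwa [vcLk_cons_ne _ _ _ _ hk] at this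
  · rintro ⟨h1, h2⟩ k
    by_cases hk : k = ka
    · rw [hk, vcLk_cons_self]; exact h1
    · rw [vcLk_cons_ne _ _ _ _ hk]; exact h2 k

/-- splitting the ∃-side at a fresh head key. -/
theorem vc_exists_cons (ka : String) (va : Int) (xs : List (String × Int))
    (g : String → Int) (h0 : vcLk xs ka = 0) (hg : g ka = 0) :
    (∃ k, vcLk ((ka, va) :: xs) k > g k) ↔ (va > g ka ∨ ∃ k, vcLk xs k > g k) := by
  constructor
  · rintro ⟨k, hk⟩
    by_cases hka : k = ka
    · rw [hka, vcLk_cons_self] at hk; exact Or.inl hk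
    · rw [vcLk_cons_ne _ _ _ _ hka] at hk; exact Or.inr ⟨k, hk⟩
  · rintro (h | ⟨k, hk⟩)
    · exact ⟨ka, by rwa [vcLk_cons_self]⟩
    · by_cases hka : k = ka
      · rw [hka, h0, hg] at hk; omega
      · exact ⟨k, by rwa [vcLk_cons_ne _ _ _ _ hka]⟩

/-- splitting both sides at a shared head key. -/
theorem vc_forall_cons2 (ka : String) (va vb : Int) (xs ys : List (String × Int))
    (hx0 : vcLk xs ka = 0) (hy0 : vcLk ys ka = 0) :
    (∀ k, vcLk ((ka, va) :: xs) k ≥ vcLk ((ka, vb) :: ys) k) ↔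
      (va ≥ vb ∧ ∀ k, vcLk xs k ≥ vcLk ys k) := by
  constructor
  · intro h
    refine ⟨by have := h ka; rwa [vcLk_cons_self, vcLk_cons_self] at this, fun k => ?_⟩
    by_cases hk : k = ka
    · rw [hk, hx0, hy0]
    · have := h k; rwa [vcLk_cons_ne _ _ _ _ hk, vcLk_cons_ne _ _ _ _ hk] at this
  · rintro ⟨h1, h2⟩ k
    by_cases hk : k = ka
    · rw [hk, vcLk_cons_self, vcLk_cons_self]; exact h1
    · rw [vcLk_cons_ne _ _ _ _ hk, vcLk_cons_ne _ _ _ _ hk]; exact h2 k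

theorem vc_exists_cons2 (ka : String) (va vb : Int) (xs ys : List (String × Int))
    (hx0 : vcLk xs ka = 0) (hy0 : vcLk ys ka = 0) :
    (∃ k, vcLk ((ka, va) :: xs) k > vcLk ((ka, vb) :: ys) k) ↔
      (va > vb ∨ ∃ k, vcLk xs k > vcLk ys k) := by
  constructor
  · rintro ⟨k, hk⟩
    by_cases hka : k = ka
    · rw [hka, vcLk_cons_self, vcLk_cons_self] at hk; exact Or.inl hk
    · rw [vcLk_cons_ne _ _ _ _ hka, vcLk_cons_ne _ _ _ _ hka] at hk; exact Or.inr ⟨k, hk⟩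
  · rintro (h | ⟨k, hk⟩)
    · exact ⟨ka, by rw [vcLk_cons_self, vcLk_cons_self]; exact h⟩
    · by_cases hka : k = ka
      · rw [hka, hx0, hy0] at hk; omega
      · exact ⟨k, by rw [vcLk_cons_ne _ _ _ _ hka, vcLk_cons_ne _ _ _ _ hka]; exact hk⟩

/-- right-sided split: the first list is abstract, the second pops a fresh head. -/
theorem vc_forall_consR (kb : String) (vb : Int) (f : String → Int) (ys : List (String × Int))
    (h0 : vcLk ys kb = 0) (hf : f kb = 0) :
    (∀ k, f k ≥ vcLk ((kb, vb) :: ys) k) ↔ (0 ≥ vb ∧ ∀ k, f k ≥ vcLk ys k) := by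
  constructor
  · intro h
    refine ⟨by have := h kb; rwa [vcLk_cons_self, hf] at this, fun k => ?_⟩
    by_cases hk : k = kb
    · rw [hk, h0, hf]
    · have := h k; rwa [vcLk_cons_ne _ _ _ _ hk] at this
  · rintro ⟨h1, h2⟩ k
    by_cases hk : k = kb
    · rw [hk, vcLk_cons_self, hf]; exact h1
    · rw [vcLk_cons_ne _ _ _ _ hk]; exact h2 k

theorem vc_exists_consR (kb : String) (vb : Int) (f : String → Int) (ys : List (String × Int))
    (h0 : vcLk ys kb = 0) (hf : f kb = 0) :
    (∃ k, f k > vcLk ((kb, vb) :: ys) k) ↔ (0 > vb ∨ ∃ k, f k > vcLk ys k) := by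
  constructor
  · rintro ⟨k, hk⟩
    by_cases hka : k = kb
    · rw [hka, vcLk_cons_self, hf] at hk; exact Or.inl hk
    · rw [vcLk_cons_ne _ _ _ _ hka] at hk; exact Or.inr ⟨k, hk⟩
  · rintro (h | ⟨k, hk⟩)
    · exact ⟨kb, by rw [vcLk_cons_self, hf]; exact h⟩
    · by_cases hka : k = kb
      · rw [hka, h0, hf] at hk; omega
      · exact ⟨k, by rw [vcLk_cons_ne _ _ _ _ hka]; exact hk⟩

theorem vcMergeLoop_char (xs ys : List (String × Int)) (gt : Bool)
    (hx : xs.Pairwise (fun p q => p.1 < q.1)) (hy : ys.Pairwise (fun p q => p.1 < q.1)) :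
    vcMergeLoop xs ys gt = true ↔
      ((∀ k, vcLk xs k ≥ vcLk ys k) ∧ (gt = true ∨ ∃ k, vcLk xs k > vcLk ys k)) := by
  induction xs generalizing ys gt with
  | nil =>
    induction ys generalizing gt with
    | nil => simp [vcMergeLoop, vcLk_nil]
    | cons q ys ihy =>
      obtain ⟨kb, vb⟩ := q
      have h0 : vcLk ys kb = 0 := vcLk_head_tail _ _ _ hy
      by_cases hvb : 0 < vb
      · simp only [vcMergeLoop, if_pos hvb]
        constructor
        · intro h; exact absurd h (by simp)
        · rintro ⟨hall, -⟩
          have := hall kb; rw [vcLk_cons_self, vcLk_nil] at this; omega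
      · rw [show vcMergeLoop [] ((kb, vb) :: ys) gt
              = vcMergeLoop [] ys (gt || decide (vb < 0)) by
            simp [vcMergeLoop, hvb]]
        refine (ihy (gt || decide (vb < 0)) (hy.sublist (List.sublist_cons_self _ _))).trans ?_
        rw [vc_forall_consR kb vb (vcLk []) ys h0 (vcLk_nil kb),
            vc_exists_consR kb vb (vcLk []) ys h0 (vcLk_nil kb)]
        simp only [Bool.or_eq_true, decide_eq_true_eq]
        constructor
        · rintro ⟨h1, h2⟩; exact ⟨⟨by omega, h1⟩, by tauto⟩
        · rintro ⟨⟨-, h1⟩, h2⟩; exact ⟨h1, by tauto⟩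
  | cons p xs ihx =>
    obtain ⟨ka, va⟩ := p
    have hx0 : vcLk xs ka = 0 := vcLk_head_tail _ _ _ hx
    induction ys generalizing gt with
    | nil =>
      by_cases hva : va < 0
      · simp only [vcMergeLoop, if_pos hva]
        constructor
        · intro h; exact absurd h (by simp)
        · rintro ⟨hall, -⟩
          have := hall ka; rw [vcLk_cons_self, vcLk_nil] at this; omega
      · rw [show vcMergeLoop ((ka, va) :: xs) [] gt
              = vcMergeLoop xs [] (gt || decide (va > 0)) by
            simp [vcMergeLoop, hva]]
        rw [ihx [] _ (hx.sublist (List.sublist_cons_self _ _)) List.Pairwise.nil,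
            vc_forall_cons ka va xs (vcLk []) hx0 (vcLk_nil ka),
            vc_exists_cons ka va xs (vcLk []) hx0 (vcLk_nil ka)]
        simp only [Bool.or_eq_true, decide_eq_true_eq, vcLk_nil]
        constructor
        · rintro ⟨h1, h2⟩; exact ⟨⟨by omega, h1⟩, by tauto⟩
        · rintro ⟨⟨-, h1⟩, h2⟩; exact ⟨h1, by tauto⟩
    | cons q ys ihy =>
      obtain ⟨kb, vb⟩ := q
      have hy0 : vcLk ys kb = 0 := vcLk_head_tail _ _ _ hy
      rcases lt_trichotomy ka kb with hlt | heq | hgt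
      · -- ka < kb : a-only key
        have hzero : vcLk ((kb, vb) :: ys) ka = 0 := vcLk_lt_head _ _ _ _ hy hlt
        by_cases hva : va < 0
        · simp only [vcMergeLoop, if_pos hlt, if_pos hva]
          constructor
          · intro h; exact absurd h (by simp)
          · rintro ⟨hall, -⟩
            have := hall ka; rw [vcLk_cons_self, hzero] at this; omega
        · rw [show vcMergeLoop ((ka, va) :: xs) ((kb, vb) :: ys) gt
                = vcMergeLoop xs ((kb, vb) :: ys) (gt || decide (va > 0)) by
              simp [vcMergeLoop, hlt, hva]]
          rw [ihx _ _ (hx.sublist (List.sublist_cons_self _ _)) hy,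
              vc_forall_cons ka va xs _ hx0 hzero,
              vc_exists_cons ka va xs _ hx0 hzero]
          simp only [Bool.or_eq_true, decide_eq_true_eq, hzero]
          constructor
          · rintro ⟨h1, h2⟩; exact ⟨⟨by omega, h1⟩, by tauto⟩
          · rintro ⟨⟨-, h1⟩, h2⟩; exact ⟨h1, by tauto⟩
      · -- ka = kb : shared key
        subst heq
        rw [show vcMergeLoop ((ka, va) :: xs) ((ka, vb) :: ys) gt
              = if va < vb then false else vcMergeLoop xs ys (gt || decide (va > vb)) by
            simp [vcMergeLoop]]
        by_cases hva : va < vb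
        · rw [if_pos hva]
          constructor
          · intro h; exact absurd h (by simp)
          · rintro ⟨hall, -⟩
            have := hall ka; rw [vcLk_cons_self, vcLk_cons_self] at this; omega
        · rw [if_neg hva,
              ihx _ _ (hx.sublist (List.sublist_cons_self _ _))
                (hy.sublist (List.sublist_cons_self _ _)),
              vc_forall_cons2 ka va vb xs ys hx0 hy0,
              vc_exists_cons2 ka va vb xs ys hx0 hy0]
          simp only [Bool.or_eq_true, decide_eq_true_eq]
          constructor
          · rintro ⟨h1, h2⟩; exact ⟨⟨by omega, h1⟩, by tauto⟩
          · rintro ⟨⟨-, h1⟩, h2⟩; exact ⟨h1, by tauto⟩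
      · -- kb < ka : b-only key
        have hzero : vcLk ((ka, va) :: xs) kb = 0 := vcLk_lt_head _ _ _ _ hx hgt
        by_cases hvb : 0 < vb
        · simp only [vcMergeLoop, if_neg (asymm hgt), if_pos hgt, if_pos hvb]
          constructor
          · intro h; exact absurd h (by simp)
          · rintro ⟨hall, -⟩
            have := hall kb; rw [vcLk_cons_self, hzero] at this; omega
        · rw [show vcMergeLoop ((ka, va) :: xs) ((kb, vb) :: ys) gt
                = vcMergeLoop ((ka, va) :: xs) ys (gt || decide (vb < 0)) by
              simp [vcMergeLoop, asymm hgt, hgt, hvb]]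
          refine (ihy (gt || decide (vb < 0)) (hy.sublist (List.sublist_cons_self _ _))).trans ?_
          rw [vc_forall_consR kb vb _ ys hy0 hzero,
              vc_exists_consR kb vb _ ys hy0 hzero]
          simp only [Bool.or_eq_true, decide_eq_true_eq]
          constructor
          · rintro ⟨h1, h2⟩; exact ⟨⟨by omega, h1⟩, by tauto⟩
          · rintro ⟨⟨-, h1⟩, h2⟩; exact ⟨h1, by tauto⟩

/-- first-match lookup in a nodup-keys list finds the unique pair. -/
theorem vcLk_of_mem_nodup (l : List (String × Int)) (k : String) (v : Int)
    (hnd : (l.map Prod.fst).Nodup) (hmem : (k, v) ∈ l) : vcLk l k = v := by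
  induction l with
  | nil => cases hmem
  | cons p l ih =>
    obtain ⟨ka, va⟩ := p
    rcases List.mem_cons.mp hmem with h | h
    · injection h with h1 h2
      subst h2
      rw [← h1]
      exact vcLk_cons_self _ _ _
    · have hk : k ≠ ka := by
        rintro rfl
        exact (List.nodup_cons.mp hnd).1 (List.mem_map.mpr ⟨(k, v), h, rfl⟩)
      rw [vcLk_cons_ne _ _ _ _ hk]
      exact ih (List.nodup_cons.mp hnd).2 h

/-- the sorted-items lookup agrees with the dict lookup. -/
theorem vcLk_sorted_items (d : PySem.Dict String Int) (hnd : d.keys.Nodup) (k : String) :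
    vcLk (PySem.List.sorted d.items (fun kv => kv.1) false) k = d.getD k 0 := by
  have hperm : (PySem.List.sorted d.items (fun kv => kv.1) false).Perm d.items :=
    PySem.List.sorted_perm _ _ _
  have hkeys : ((PySem.List.sorted d.items (fun kv => kv.1) false).map Prod.fst).Perm d.keys :=
    hperm.map Prod.fst
  have hnd' : ((PySem.List.sorted d.items (fun kv => kv.1) false).map Prod.fst).Nodup :=
    (hkeys.nodup_iff).mpr hnd
  by_cases hc : k ∈ d.keys
  · obtain ⟨p, hp, hpk⟩ := List.mem_map.mp hc
    obtain ⟨k', v⟩ := p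
    simp only at hpk
    subst hpk
    rw [PySem.Dict.getD_of_mem_items d hp hnd 0]
    exact vcLk_of_mem_nodup _ _ _ hnd' (hperm.mem_iff.mpr hp)
  · rw [PySem.Dict.getD_of_not_contains d 0 (by
      rw [← Bool.not_eq_true]
      exact fun hcc => hc ((PySem.Dict.contains_iff_mem_keys d k).mp hcc))]
    exact vcLk_of_not_mem _ _ (fun hm => hc (hkeys.mem_iff.mp hm))

/-- sorted items of a nodup-keys dict are strictly increasing in the key. -/
theorem sorted_items_pairwise (d : PySem.Dict String Int) (hnd : d.keys.Nodup) :
    (PySem.List.sorted d.items (fun kv => kv.1) false).Pairwise (fun p q => p.1 < q.1) := by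
  have hle : (PySem.List.sorted d.items (fun kv => kv.1) false).Pairwise
      (fun p q => p.1 ≤ q.1) := PySem.List.sorted_pairwise _ _
  have hperm : (PySem.List.sorted d.items (fun kv => kv.1) false).Perm d.items :=
    PySem.List.sorted_perm _ _ _
  have hnd' : ((PySem.List.sorted d.items (fun kv => kv.1) false).map Prod.fst).Nodup :=
    ((hperm.map Prod.fst).nodup_iff).mpr hnd
  have hne : (PySem.List.sorted d.items (fun kv => kv.1) false).Pairwise
      (fun p q => p.1 ≠ q.1) := List.pairwise_map.mp hnd'
  exact (hle.and hne).imp (fun h => lt_of_le_of_ne h.1 h.2)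

/-- A's loop characterised over all keys (its earlier closed form, then the union
    membership argument). -/
theorem vcLoopA_eq (a b : PySem.Dict String Int) (ks : List String) (gt : Bool) :
    vcLoopA a b ks true gt =
      ((ks.all fun k => a.getD k 0 ≥ b.getD k 0) &&
       (gt || ks.any fun k => a.getD k 0 > b.getD k 0)) := by
  induction ks generalizing gt with
  | nil => simp [vcLoopA]
  | cons k ks ih =>
    simp only [vcLoopA, List.all_cons, List.any_cons]
    by_cases hlt : a.getD k 0 < b.getD k 0
    · simp [hlt, show ¬ (a.getD k 0 ≥ b.getD k 0) by omega]
    · have hge : (decide (a.getD k 0 ≥ b.getD k 0)) = true := by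
        simp; omega
      by_cases hgt : a.getD k 0 > b.getD k 0
      · simp [hlt, hgt, ih, hge]
      · simp [hlt, hgt, ih, hge]

theorem vc_dominates_py_char (a b : List (String × Int)) :
    vc_dominates_py a b = true ↔
      ((∀ k, (PySem.Dict.ofList a).getD k 0 ≥ (PySem.Dict.ofList b).getD k 0) ∧
       (∃ k, (PySem.Dict.ofList a).getD k 0 > (PySem.Dict.ofList b).getD k 0)) := by
  unfold vc_dominates_py
  rw [vcLoopA_eq, Bool.false_or, Bool.and_eq_true, List.all_eq_true, List.any_eq_true]
  have hmem : ∀ k, k ∉ PySem.Set.union (PySem.Set.ofList (PySem.Dict.ofList a).keys)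
      (PySem.Dict.ofList b).keys →
      (PySem.Dict.ofList a).getD k 0 = 0 ∧ (PySem.Dict.ofList b).getD k 0 = 0 := by
    intro k hk
    rw [PySem.Set.mem_union, PySem.Set.mem_ofList] at hk
    push Not at hk
    constructor <;>
      exact PySem.Dict.getD_of_not_contains _ 0 (by
        rw [← Bool.not_eq_true]
        exact fun hcc => absurd ((PySem.Dict.contains_iff_mem_keys _ k).mp hcc)
          (by first | exact hk.1 | exact hk.2))
  constructor
  · rintro ⟨h1, k, hk2⟩
    refine ⟨fun k' => ?_, ⟨k, by simpa using hk2.2⟩⟩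
    by_cases hm : k' ∈ PySem.Set.union (PySem.Set.ofList (PySem.Dict.ofList a).keys)
        (PySem.Dict.ofList b).keys
    · simpa using h1 k' hm
    · obtain ⟨e1, e2⟩ := hmem k' hm; rw [e1, e2]
  · rintro ⟨h1, k, hk2⟩
    refine ⟨fun k' _ => by simpa using h1 k', ⟨k, ?_, by simpa using hk2⟩⟩
    by_contra hm
    obtain ⟨e1, e2⟩ := hmem k hm
    rw [e1, e2] at hk2; omega

theorem vc_dominates_py_alt_char (a b : List (String × Int)) :
    vc_dominates_py_alt a b = true ↔
      ((∀ k, (PySem.Dict.ofList a).getD k 0 ≥ (PySem.Dict.ofList b).getD k 0) ∧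
       (∃ k, (PySem.Dict.ofList a).getD k 0 > (PySem.Dict.ofList b).getD k 0)) := by
  unfold vc_dominates_py_alt
  rw [vcMergeLoop_char _ _ _
        (sorted_items_pairwise _ (PySem.Dict.nodup_keys_ofList a))
        (sorted_items_pairwise _ (PySem.Dict.nodup_keys_ofList b))]
  simp only [vcLk_sorted_items _ (PySem.Dict.nodup_keys_ofList a),
             vcLk_sorted_items _ (PySem.Dict.nodup_keys_ofList b)]
  simp

-- ===== VERDICT (by name: the statement is the Claim_ definition above) =====
theorem vc_dominates_py_spec : Claim_equal_vc_dominates_py := by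
  intro a b _
  show vc_dominates_py a b = vc_dominates_py_alt a b
  have h1 := vc_dominates_py_char a b
  have h2 := vc_dominates_py_alt_char a b
  cases hA : vc_dominates_py a b <;> cases hB : vc_dominates_py_alt a b
  · rfl
  · exact absurd (h1.mpr (h2.mp hB)) (by simp [hA])
  · exact absurd (h2.mpr (h1.mp hA)) (by simp [hB])
  · rfl
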